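-- pv_equiv track=rewrite | github.com/martinmatak/AoC18 | day6/part1.py | index_of_closest_station
-- ===== SOURCE A (Python) =====
-- def index_of_closest_station(x, y, stations):
--     min_distance = None
--     index = -1
--     for station_x, station_y, station_index in stations:
--         distance = abs(x - station_x) + abs(y - station_y)
--         if min_distance is None or distance < min_distance:
--             min_distance = distance
--             index = station_index
--         elif distance == min_distance:
--             index = -1
--     return index
--
-- stations = []
--
-- station_index = 0
-- ===== SOURCE B (Python) =====
-- def index_of_closest_station(x, y, stations):
--     if not stations:
--         return -1
--     pairs = [(abs(x - sx) + abs(y - sy), si) for sx, sy, si in stations]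
--     m = min(d for d, _ in pairs)
--     winners = [si for d, si in pairs if d == m]
--     return winners[0] if len(winners) == 1 else -1
-- ===== Notes on version B (the rewrite author's own statement) =====
-- stated objective: simpler
-- what changed: Replaces A's incremental best/tie state machine with a build-then-reduce decomposition: compute all (distance, index) pairs, take the minimum distance, collect its winners, and return the unique winner or -1.
import Mathlib
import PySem

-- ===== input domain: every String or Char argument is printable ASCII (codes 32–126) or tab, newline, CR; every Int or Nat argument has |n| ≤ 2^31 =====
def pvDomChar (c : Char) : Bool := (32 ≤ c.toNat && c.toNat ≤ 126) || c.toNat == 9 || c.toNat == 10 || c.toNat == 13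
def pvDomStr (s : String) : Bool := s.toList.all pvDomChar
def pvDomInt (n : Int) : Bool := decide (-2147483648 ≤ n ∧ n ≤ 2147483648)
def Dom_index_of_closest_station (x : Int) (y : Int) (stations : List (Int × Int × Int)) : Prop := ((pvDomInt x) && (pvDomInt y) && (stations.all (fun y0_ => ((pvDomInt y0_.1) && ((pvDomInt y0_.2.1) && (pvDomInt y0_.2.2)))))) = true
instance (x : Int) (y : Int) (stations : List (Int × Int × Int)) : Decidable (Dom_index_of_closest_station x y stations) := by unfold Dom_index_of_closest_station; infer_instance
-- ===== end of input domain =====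

-- B replaces A's incremental best/tie state machine with a build-distances / min / collect-winners decomposition (same O(n) cost, plainer).


-- ===== PORT A =====
-- one loop step of A: state = (min_distance : Option Int, index : Int)
def pvStepA (x y : Int) (st : Option Int × Int) (t : Int × Int × Int) : Option Int × Int :=
  let distance := |x - t.1| + |y - t.2.1|
  match st.1 with
  | none => (some distance, t.2.2)
  | some m =>
    if distance < m then (some distance, t.2.2)
    else if distance = m then (some m, -1)
    else (some m, st.2)

def index_of_closest_station (x : Int) (y : Int) (stations : List (Int × Int × Int)) : Int :=
  (stations.foldl (pvStepA x y) (none, -1)).2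

-- ===== PORT B =====
def index_of_closest_station_alt (x : Int) (y : Int) (stations : List (Int × Int × Int)) : Int :=
  match stations with
  | [] => -1
  | _ :: _ =>
    let pairs := stations.map (fun t => (|x - t.1| + |y - t.2.1|, t.2.2))
    match PySem.List.min? (pairs.map Prod.fst) (fun d => d) with
    | none => -1   -- unreachable: pairs is nonempty
    | some m =>
      let winners := (pairs.filter (fun p => p.1 == m)).map Prod.snd
      match winners with
      | [w] => w
      | _ => -1

-- ===== PRECONDITION & SPEC =====
def Spec_index_of_closest_station (x : Int) (y : Int) (stations : List (Int × Int × Int)) (out : Int) : Prop := out = index_of_closest_station_alt x y stations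
instance (x : Int) (y : Int) (stations : List (Int × Int × Int)) (out : Int) : Decidable (Spec_index_of_closest_station x y stations out) := by unfold Spec_index_of_closest_station; infer_instance

-- ===== CLAIM (what is proved, stated in full; the proofs are below) =====
def Claim_equal_index_of_closest_station : Prop := ∀ (x : Int) (y : Int) (stations : List (Int × Int × Int)), Dom_index_of_closest_station x y stations → Spec_index_of_closest_station x y stations (index_of_closest_station x y stations)

-- ===== LEMMAS AND PROOFS =====

-- distance of a station
def pvD (x y : Int) (t : Int × Int × Int) : Int := |x - t.1| + |y - t.2.1|

-- "winners" selection used by B, phrased on the raw station list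
def pvSel (x y : Int) (M : Int) (l : List (Int × Int × Int)) : Int :=
  match (l.filter (fun t => pvD x y t == M)).map (fun t => t.2.2) with
  | [w] => w
  | _ => -1

-- running minimum of the distances of l, seeded with a
def pvMin (x y : Int) (l : List (Int × Int × Int)) (a : Int) : Int :=
  l.foldl (fun m t => min m (pvD x y t)) a

lemma pvMin_eq_foldl_map (x y : Int) (l : List (Int × Int × Int)) (a : Int) :
    pvMin x y l a = (l.map (pvD x y)).foldl min a := by
  rw [pvMin, List.foldl_map]

lemma pvMin_le_mem (x y : Int) (l : List (Int × Int × Int)) (a : Int)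
    (t : Int × Int × Int) (ht : t ∈ l) : pvMin x y l a ≤ pvD x y t := by
  rw [pvMin_eq_foldl_map]
  exact (PySem.List.foldl_min_le _ _).2 _ (List.mem_map_of_mem ht)

lemma pvMin_all_ge (x y : Int) (l : List (Int × Int × Int)) (a : Int)
    (h : ∀ t ∈ l, a ≤ pvD x y t) : pvMin x y l a = a := by
  induction l generalizing a with
  | nil => rfl
  | cons t l ih =>
    rw [pvMin, List.foldl_cons, min_eq_left (h t (by simp))]
    exact ih a (fun u hu => h u (by simp [hu]))

lemma pvMin_cons (x y : Int) (t : Int × Int × Int) (l : List (Int × Int × Int)) (a : Int) :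
    pvMin x y (t :: l) a = pvMin x y l (min a (pvD x y t)) := rfl

lemma pvSel_not_mem (x y M : Int) (t : Int × Int × Int) (l : List (Int × Int × Int))
    (h : pvD x y t ≠ M) : pvSel x y M (t :: l) = pvSel x y M l := by
  simp [pvSel, h]

-- head is the unique winner
lemma pvSel_head_unique (x y : Int) (t : Int × Int × Int) (l : List (Int × Int × Int))
    (h : ∀ u ∈ l, pvD x y t < pvD x y u) : pvSel x y (pvD x y t) (t :: l) = t.2.2 := by
  have hfl : l.filter (fun u => pvD x y u == pvD x y t) = [] := by
    rw [List.filter_eq_nil_iff]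
    intro u hu
    simp only [beq_iff_eq]
    exact fun he => absurd he (by have := h u hu; omega)
  simp [pvSel, hfl]

-- head ties with another winner
lemma pvSel_head_tie (x y : Int) (t : Int × Int × Int) (l : List (Int × Int × Int))
    (u : Int × Int × Int) (hu : u ∈ l) (hue : pvD x y u = pvD x y t) :
    pvSel x y (pvD x y t) (t :: l) = -1 := by
  have hne : l.filter (fun v => pvD x y v == pvD x y t) ≠ [] := by
    intro hnil
    have : u ∈ l.filter (fun v => pvD x y v == pvD x y t) := by
      simp [List.mem_filter, hu, hue]
    rw [hnil] at this; cases this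
  simp only [pvSel, List.filter_cons, beq_self_eq_true]
  cases hfl : l.filter (fun v => pvD x y v == pvD x y t) with
  | nil => exact absurd hfl hne
  | cons a as => simp

-- A's loop, characterised from an arbitrary reached state (some m0, i0)
lemma loopA_char (x y : Int) (l : List (Int × Int × Int)) (m0 i0 : Int) :
    (l.foldl (pvStepA x y) (some m0, i0)).2 =
      if ∀ t ∈ l, m0 < pvD x y t then i0
      else if ∀ t ∈ l, m0 ≤ pvD x y t then -1
      else pvSel x y (pvMin x y l m0) l := by
  induction l generalizing m0 i0 with
  | nil => simp
  | cons t l ih =>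
    have hd : pvD x y t = |x - t.1| + |y - t.2.1| := rfl
    have hmem : t ∈ t :: l := List.mem_cons_self ..
    rw [List.foldl_cons]
    by_cases h1 : pvD x y t < m0
    · -- strictly better: state becomes (some d, t.idx)
      have hstep : pvStepA x y (some m0, i0) t = (some (pvD x y t), t.2.2) := by
        simp [pvStepA, ← hd, h1]
      have c1 : ¬ ∀ u ∈ t :: l, m0 < pvD x y u :=
        fun h => absurd (h t hmem) (not_lt.mpr (le_of_lt h1))
      have c2 : ¬ ∀ u ∈ t :: l, m0 ≤ pvD x y u :=
        fun h => absurd (h t hmem) (not_le.mpr h1)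
      rw [hstep, ih, if_neg c1, if_neg c2, pvMin_cons, min_eq_right (le_of_lt h1)]
      by_cases hall : ∀ u ∈ l, pvD x y t < pvD x y u
      · rw [if_pos hall, pvMin_all_ge x y l _ (fun u hu => le_of_lt (hall u hu))]
        exact (pvSel_head_unique x y t l hall).symm
      · rw [if_neg hall]
        by_cases h3 : ∀ u ∈ l, pvD x y t ≤ pvD x y u
        · rw [if_pos h3, pvMin_all_ge x y l _ h3]
          push_neg at hall
          obtain ⟨u, hu, hule⟩ := hall
          exact (pvSel_head_tie x y t l u hu (le_antisymm hule (h3 u hu))).symm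
        · rw [if_neg h3]
          push_neg at h3
          obtain ⟨v, hv, hvlt⟩ := h3
          have hMlt : pvMin x y l (pvD x y t) < pvD x y t :=
            lt_of_le_of_lt (pvMin_le_mem x y l _ v hv) hvlt
          rw [pvSel_not_mem x y _ t l (ne_of_gt hMlt)]
    · by_cases h2 : pvD x y t = m0
      · -- tie with current minimum: index resets to -1
        have hstep : pvStepA x y (some m0, i0) t = (some m0, -1) := by
          simp [pvStepA, ← hd, h1, h2]
        have c1 : ¬ ∀ u ∈ t :: l, m0 < pvD x y u :=
          fun h => absurd (h t hmem) (not_lt.mpr h2.le)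
        rw [hstep, ih]
        by_cases h3 : ∀ u ∈ l, m0 ≤ pvD x y u
        · have c2 : ∀ u ∈ t :: l, m0 ≤ pvD x y u := by
            intro u hu
            rcases List.mem_cons.1 hu with h | h
            · subst h; exact h2.ge
            · exact h3 u h
          rw [if_neg c1, if_pos c2]
          by_cases h4 : ∀ u ∈ l, m0 < pvD x y u
          · rw [if_pos h4]
          · rw [if_neg h4, if_pos h3]
        · have c2 : ¬ ∀ u ∈ t :: l, m0 ≤ pvD x y u :=
            fun h => h3 (fun u hu => h u (List.mem_cons_of_mem t hu))
          have h4 : ¬ ∀ u ∈ l, m0 < pvD x y u :=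
            fun h => h3 (fun u hu => le_of_lt (h u hu))
          rw [if_neg c1, if_neg c2, if_neg h4, if_neg h3]
          push_neg at h3
          obtain ⟨v, hv, hvlt⟩ := h3
          rw [pvMin_cons, min_eq_left h2.ge]
          have hMlt : pvMin x y l m0 < m0 :=
            lt_of_le_of_lt (pvMin_le_mem x y l _ v hv) hvlt
          rw [pvSel_not_mem x y _ t l (ne_of_gt (lt_of_lt_of_le hMlt h2.ge))]
      · -- strictly worse: state unchanged
        have h1' : m0 < pvD x y t := by omega
        have hstep : pvStepA x y (some m0, i0) t = (some m0, i0) := by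
          simp [pvStepA, ← hd, h1, h2]
        rw [hstep, ih]
        by_cases h4 : ∀ u ∈ l, m0 < pvD x y u
        · have c1 : ∀ u ∈ t :: l, m0 < pvD x y u := by
            intro u hu
            rcases List.mem_cons.1 hu with h | h
            · subst h; exact h1'
            · exact h4 u h
          rw [if_pos h4, if_pos c1]
        · have c1 : ¬ ∀ u ∈ t :: l, m0 < pvD x y u :=
            fun h => h4 (fun u hu => h u (List.mem_cons_of_mem t hu))
          rw [if_neg h4, if_neg c1]
          by_cases h3 : ∀ u ∈ l, m0 ≤ pvD x y u
          · have c2 : ∀ u ∈ t :: l, m0 ≤ pvD x y u := by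
              intro u hu
              rcases List.mem_cons.1 hu with h | h
              · subst h; exact le_of_lt h1'
              · exact h3 u h
            rw [if_pos h3, if_pos c2]
          · have c2 : ¬ ∀ u ∈ t :: l, m0 ≤ pvD x y u :=
              fun h => h3 (fun u hu => h u (List.mem_cons_of_mem t hu))
            rw [if_neg h3, if_neg c2]
            push_neg at h3
            obtain ⟨v, hv, hvlt⟩ := h3
            rw [pvMin_cons, min_eq_left (le_of_lt h1')]
            have hMlt : pvMin x y l m0 < m0 :=
              lt_of_le_of_lt (pvMin_le_mem x y l _ v hv) hvlt
            rw [pvSel_not_mem x y _ t l (ne_of_gt (lt_trans hMlt h1'))]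

-- B on s :: rest, rephrased through pvSel and the running minimum
lemma altB_char (x y : Int) (s : Int × Int × Int) (rest : List (Int × Int × Int)) :
    index_of_closest_station_alt x y (s :: rest) =
      pvSel x y (pvMin x y rest (pvD x y s)) (s :: rest) := by
  unfold index_of_closest_station_alt
  simp only [List.map_cons]
  rw [PySem.List.min?_id_cons]
  have hmap : (rest.map (fun t => (|x - t.1| + |y - t.2.1|, t.2.2))).map Prod.fst
      = rest.map (pvD x y) := by
    simp only [List.map_map]; rfl
  rw [hmap]
  dsimp only
  have hfold : (rest.map (pvD x y)).foldl min (|x - s.1| + |y - s.2.1|)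
      = pvMin x y rest (pvD x y s) := by
    rw [pvMin_eq_foldl_map]; rfl
  rw [hfold]
  set M := pvMin x y rest (pvD x y s) with hM
  have hfil : ((s :: rest).map (fun t => (|x - t.1| + |y - t.2.1|, t.2.2))).filter
        (fun p => p.1 == M)
      = ((s :: rest).filter (fun t => pvD x y t == M)).map
        (fun t => (|x - t.1| + |y - t.2.1|, t.2.2)) := by
    rw [List.filter_map]
    rfl
  simp only [List.map_cons] at hfil
  rw [hfil]
  unfold pvSel
  rw [List.map_map]
  cases hc : (s :: rest).filter (fun t => pvD x y t == M) with
  | nil => rfl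
  | cons a as =>
    cases as with
    | nil => rfl
    | cons b bs => rfl

-- ===== VERDICT (by name: the statement is the Claim_ definition above) =====
theorem index_of_closest_station_spec : Claim_equal_index_of_closest_station := by
  intro x y stations _
  unfold Spec_index_of_closest_station
  cases stations with
  | nil => rfl
  | cons s rest =>
    rw [altB_char]
    unfold index_of_closest_station
    rw [List.foldl_cons]
    have hstep : pvStepA x y (none, -1) s = (some (pvD x y s), s.2.2) := rfl
    rw [hstep, loopA_char]
    by_cases hA : ∀ t ∈ rest, pvD x y s < pvD x y t
    · rw [if_pos hA, pvMin_all_ge x y rest _ (fun u hu => le_of_lt (hA u hu))]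
      exact (pvSel_head_unique x y s rest hA).symm
    · rw [if_neg hA]
      by_cases hB : ∀ t ∈ rest, pvD x y s ≤ pvD x y t
      · rw [if_pos hB, pvMin_all_ge x y rest _ hB]
        push_neg at hA
        obtain ⟨u, hu, hule⟩ := hA
        exact (pvSel_head_tie x y s rest u hu (le_antisymm hule (hB u hu))).symm
      · rw [if_neg hB]
        push_neg at hB
        obtain ⟨v, hv, hvlt⟩ := hB
        have hMlt : pvMin x y rest (pvD x y s) < pvD x y s :=
          lt_of_le_of_lt (pvMin_le_mem x y rest _ v hv) hvlt
        rw [pvSel_not_mem x y _ s rest (ne_of_gt hMlt)]
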